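-- pv_equiv track=rewrite | github.com/slidracoon72/leetcode | LuckyNumbersInAMatrix.py | luckyNumbers1
-- ===== SOURCE A (Python) =====
-- from typing import List
--
-- def luckyNumbers1(matrix: List[List[int]]) -> List[int]:
--     rows, cols = len(matrix), len(matrix[0])
--
--     # Step 1: Find the maximum of the minimum values from each row
--     max_of_row_mins = float('-inf')  # Initialize to negative infinity to find the max value
--     for r in range(rows):
--         row_min = min(matrix[r])  # Find the minimum value in the current row
--         max_of_row_mins = max(max_of_row_mins, row_min)  # Update max_of_row_mins if current row_min is larger
--
--     # Step 2: Check each column to find if the max_of_row_mins is the maximum in any column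
--     for c in range(cols):
--         col_max = float('-inf')  # Initialize to negative infinity to find the max value
--         for r in range(rows):
--             col_max = max(col_max, matrix[r][c])  # Update col_max if the current element is larger
--         if col_max == max_of_row_mins:  # If we find a column where col_max matches max_of_row_mins
--             return [col_max]  # Return the lucky number as a list
--
--     return []  # If no lucky number is found, return an empty list
-- ===== SOURCE B (Python) =====
-- from typing import List
--
-- def luckyNumbers1(matrix: List[List[int]]) -> List[int]:
--     row_mins = {min(row) for row in matrix}
--     col_maxes = {max(col) for col in zip(*matrix)}
--     return [x for x in row_mins if x in col_maxes]
-- ===== Notes on version B (the rewrite author's own statement) =====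
-- stated objective: idiomatic
-- what changed: Replaces A's candidate-then-nested-column-scan (running max of row minimums followed by an explicit per-column max loop with early return) by building the set of row minimums and the set of column maximums (via zip(*matrix)) in two comprehensions and returning their intersection, relying on the minimax property that the intersection holds at most one value.
-- outside the precondition, e.g. on luckyNumbers1([[1, 2], [1]]): A returns [1], B returns [1]
import Mathlib
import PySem

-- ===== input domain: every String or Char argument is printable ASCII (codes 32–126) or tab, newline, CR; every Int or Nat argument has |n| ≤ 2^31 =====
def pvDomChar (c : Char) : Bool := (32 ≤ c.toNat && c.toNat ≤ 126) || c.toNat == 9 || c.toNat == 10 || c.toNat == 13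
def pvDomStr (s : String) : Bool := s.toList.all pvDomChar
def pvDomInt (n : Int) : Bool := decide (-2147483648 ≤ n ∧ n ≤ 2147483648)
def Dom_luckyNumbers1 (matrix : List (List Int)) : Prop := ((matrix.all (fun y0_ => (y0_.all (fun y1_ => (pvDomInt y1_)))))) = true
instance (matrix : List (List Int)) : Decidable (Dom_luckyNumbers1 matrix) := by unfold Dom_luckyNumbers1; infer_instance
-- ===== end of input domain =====

-- B replaces A's candidate-then-column-scan by intersecting the set of row minimums with the set of
-- column maximums (idiomatic set formulation; same asymptotic cost).

-- ===== PORT A =====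
-- step-2 inner loop: running column maximum for column c (Option Int: none = the float('-inf') start)
def pvColMaxA (matrix : List (List Int)) (rows c : Int) : Option Int :=
  (PySem.List.pyRange 0 rows 1).foldl
    (fun acc r =>
      some (match acc with
        | none => PySem.List.pyGetD (PySem.List.pyGetD matrix r []) c 0
        | some a => max a (PySem.List.pyGetD (PySem.List.pyGetD matrix r []) c 0))) none
      -- matrix[r][c]; out-of-range indices (IndexError) are excluded by Pre_

-- the step-2 column loop with its early return
def pvColLoopA (matrix : List (List Int)) (rows : Int) (m : Option Int) : List Int → List Int
  | [] => []
  | c :: cs =>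
    if pvColMaxA matrix rows c == m then [(pvColMaxA matrix rows c).getD 0]
    else pvColLoopA matrix rows m cs

def luckyNumbers1 (matrix : List (List Int)) : List Int :=
  pvColLoopA matrix (matrix.length : Int)
    -- step 1: max_of_row_mins as a running max (none = float('-inf'));
    -- min(matrix[r]) on an empty row (ValueError) is excluded by Pre_
    ((PySem.List.pyRange 0 (matrix.length : Int) 1).foldl
      (fun acc r =>
        some (match acc with
          | none => (PySem.List.min? (PySem.List.pyGetD matrix r []) (fun y => y)).getD 0
          | some a => max a ((PySem.List.min? (PySem.List.pyGetD matrix r []) (fun y => y)).getD 0))) none)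
    (PySem.List.pyRange 0 ((PySem.List.pyGetD matrix 0 []).length : Int) 1)
    -- cols = len(matrix[0]); IndexError on the empty matrix is excluded by Pre_

-- ===== PORT B =====
-- zip(*matrix), hand-ported (exact zip semantics: stop as soon as some row is exhausted)
def pvZipStar (m : List (List Int)) : List (List Int) :=
  if h : m.isEmpty ∨ m.any (·.isEmpty) then []
  else (m.map (fun r => r.headD 0)) :: pvZipStar (m.map (fun r => r.tail))
  termination_by (m.headD []).length
  decreasing_by
    rw [not_or] at h
    obtain ⟨h1, h2⟩ := h
    match m with
    | [] => simp at h1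
    | r :: t =>
      have hr : r ≠ [] := by intro e; exact h2 (by simp [e])
      match r with
      | x :: xs => simp

def luckyNumbers1_alt (matrix : List (List Int)) : List Int :=
  (PySem.Set.ofList (matrix.map (fun row => (PySem.List.min? row (fun y => y)).getD 0))).filter
    (fun x => PySem.Set.contains
      (PySem.Set.ofList ((pvZipStar matrix).map (fun col => (PySem.List.max? col (fun y => y)).getD 0))) x)
  -- min(row)/max(col) on empty row (ValueError) excluded by Pre_; the comprehension keeps at most
  -- one element under Pre_, so Python's set iteration order cannot influence the result

-- ===== PRECONDITION & SPEC =====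
-- Pre_ excludes the empty matrix and matrices with a row empty or shorter than the first row: there A
-- raises IndexError/ValueError except when an early lucky column returns first (rows LONGER than the
-- first are admitted).
def Pre_luckyNumbers1 (matrix : List (List Int)) : Prop :=
  matrix ≠ [] ∧ 0 < (matrix.headD []).length ∧
    ∀ row ∈ matrix, (matrix.headD []).length ≤ row.length
instance (matrix : List (List Int)) : Decidable (Pre_luckyNumbers1 matrix) := by
  unfold Pre_luckyNumbers1; infer_instance

def pvWitness_luckyNumbers1 : List (List Int) := [[3, 7, 8], [9, 11, 13], [15, 16, 17]]

def Spec_luckyNumbers1 (matrix : List (List Int)) (out : List Int) : Prop := out = luckyNumbers1_alt matrix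
instance (matrix : List (List Int)) (out : List Int) : Decidable (Spec_luckyNumbers1 matrix out) := by unfold Spec_luckyNumbers1; infer_instance

-- ===== CLAIM (what is proved, stated in full; the proofs are below) =====
def Claim_equal_luckyNumbers1 : Prop := ∀ (matrix : List (List Int)), Dom_luckyNumbers1 matrix → Pre_luckyNumbers1 matrix → Spec_luckyNumbers1 matrix (luckyNumbers1 matrix)

-- ===== LEMMAS AND PROOFS =====

-- proof-only abbreviations: the row minimum, A's candidate (max of row minimums), the column maximum
def pvRowMin (row : List Int) : Int := (PySem.List.min? row (fun y => y)).getD 0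
def pvMA (h : List Int) (t : List (List Int)) : Int := (t.map pvRowMin).foldl max (pvRowMin h)
def pvCM (h : List Int) (t : List (List Int)) (j : Nat) : Int :=
  (t.map (fun row => row.getD j 0)).foldl max (h.getD j 0)

-- a running max written with an Option accumulator (none = -inf), started at `some a`
theorem pv_optmax_fold {b : Type} (g : b → Int) (l : List b) (a : Int) :
    l.foldl (fun acc x => some (match acc with | none => g x | some v => max v (g x))) (some a)
      = some (l.foldl (fun v x => max v (g x)) a) := by
  induction l generalizing a with
  | nil => rfl
  | cons x xs ih => simpa using ih (max a (g x))

theorem pv_optmax_fold_none {b : Type} (g : b → Int) (h : b) (t : List b) :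
    (h :: t).foldl (fun acc x => some (match acc with | none => g x | some v => max v (g x))) none
      = some (t.foldl (fun v x => max v (g x)) (g h)) := by
  rw [List.foldl_cons]
  exact pv_optmax_fold g t (g h)

theorem pvColMaxA_eq (h : List Int) (t : List (List Int)) (j : Nat) :
    pvColMaxA (h :: t) ((h :: t).length : Int) (j : Int) = some (pvCM h t j) := by
  unfold pvColMaxA
  rw [PySem.List.foldl_pyRange_zero_pyGetD' (h :: t) []
    (fun (acc : Option Int) (row : List Int) => some (match acc with
      | none => PySem.List.pyGetD row (j : Int) 0
      | some v => max v (PySem.List.pyGetD row (j : Int) 0))) none]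
  rw [pv_optmax_fold_none (fun row => PySem.List.pyGetD row (j : Int) 0)]
  simp [PySem.List.pyGetD_natCast, pvCM, List.foldl_map]

theorem pvColLoopA_eq (h : List Int) (t : List (List Int)) (M : Int) (cs : List Int)
    (hcs : ∀ c ∈ cs, 0 ≤ c) :
    pvColLoopA (h :: t) ((h :: t).length : Int) (some M) cs =
      if cs.any (fun c => pvCM h t c.toNat == M) then [M] else [] := by
  induction cs with
  | nil => rfl
  | cons c cs ih =>
    have hc0 : 0 ≤ c := hcs c (by simp)
    have hcm : pvColMaxA (h :: t) ((h :: t).length : Int) c = some (pvCM h t c.toNat) := by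
      have hx := pvColMaxA_eq h t c.toNat
      rwa [Int.toNat_of_nonneg hc0] at hx
    rw [pvColLoopA, hcm]
    by_cases hv : pvCM h t c.toNat = M
    · rw [if_pos (by simp [hv])]
      simp [hv]
    · rw [if_neg (by simp [hv]), ih (fun c hc => hcs c (by simp [hc]))]
      have hb : (pvCM h t c.toNat == M) = false := by simp [hv]
      simp [hb]

-- the A side, fully characterised
theorem pvA_char (h : List Int) (t : List (List Int)) :
    luckyNumbers1 (h :: t) =
      if (PySem.List.pyRange 0 (h.length : Int) 1).any (fun c => pvCM h t c.toNat == pvMA h t)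
      then [pvMA h t] else [] := by
  unfold luckyNumbers1
  have hcols : PySem.List.pyGetD (h :: t) 0 [] = h := by
    simp [PySem.List.pyGetD, PySem.List.pyGet?, PySem.List.pyIdx?]
  rw [hcols]
  rw [PySem.List.foldl_pyRange_zero_pyGetD' (h :: t) []
    (fun (acc : Option Int) (row : List Int) => some (match acc with
      | none => (PySem.List.min? row (fun y => y)).getD 0
      | some v => max v ((PySem.List.min? row (fun y => y)).getD 0))) none]
  rw [pv_optmax_fold_none (fun row => (PySem.List.min? row (fun y => y)).getD 0)]
  have hMA : (t.foldl (fun v row => max v ((PySem.List.min? row (fun y => y)).getD 0))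
      ((PySem.List.min? h (fun y => y)).getD 0)) = pvMA h t := by
    simp [pvMA, pvRowMin, List.foldl_map]
  rw [hMA]
  exact pvColLoopA_eq h t (pvMA h t) _
    (fun c hc => (PySem.List.mem_pyRange_one.mp hc).1)

-- the B side: zip(*matrix) on a matrix whose first row is shortest is the full transpose
theorem pv_headD_getD (r : List Int) : r.headD 0 = r.getD 0 0 := by cases r <;> rfl

theorem pv_tail_getD (r : List Int) (j : Nat) : r.tail.getD j 0 = r.getD (j + 1) 0 := by
  cases r <;> rfl

theorem pvZipStar_eq (n : Nat) : ∀ (m : List (List Int)), m ≠ [] →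
    (m.headD []).length = n → (∀ row ∈ m, n ≤ row.length) →
    pvZipStar m = (List.range n).map (fun j => m.map (fun row => row.getD j 0)) := by
  induction n with
  | zero =>
    intro m hm hh _
    match m with
    | r :: t =>
      simp only [List.headD_cons] at hh
      have hr : r.isEmpty = true := by
        cases r with
        | nil => rfl
        | cons a l => simp at hh
      rw [pvZipStar, dif_pos (Or.inr (by simp [List.any_cons, hr]))]
      simp
  | succ n ih =>
    intro m hm hh hall
    match m with
    | r :: t =>
      simp only [List.headD_cons] at hh
      have hnotany : ¬ ((r :: t).isEmpty = true ∨ ((r :: t).any fun x => x.isEmpty) = true) := by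
        rintro (he | he)
        · simp at he
        · obtain ⟨row, hrow, hemp⟩ := List.any_eq_true.mp he
          have hle := hall row hrow
          rw [List.isEmpty_iff.mp hemp] at hle
          simp at hle
      rw [pvZipStar, dif_neg hnotany]
      have hih := ih ((r :: t).map (fun r => r.tail)) (by simp)
        (by simp only [List.map_cons, List.headD_cons, List.length_tail]; omega)
        (by
          intro row hrow
          obtain ⟨row0, hrow0, rfl⟩ := List.mem_map.mp hrow
          have hle := hall row0 hrow0
          simp only [List.length_tail]
          omega)
      rw [hih, List.range_succ_eq_map]
      refine congrArg₂ List.cons ?_ ?_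
      · exact List.map_congr_left (fun x _ => pv_headD_getD x)
      · rw [List.map_map]
        exact List.map_congr_left (fun j _ => by
          rw [List.map_map]
          exact List.map_congr_left (fun row _ => pv_tail_getD row j))

-- minimax inequalities
theorem pv_rowMin_le (row : List Int) (j : Nat) (hj : j < row.length) :
    pvRowMin row ≤ row.getD j 0 := by
  obtain ⟨mn, hmn⟩ : ∃ mn, PySem.List.min? row (fun y => y) = some mn := by
    cases hmin : PySem.List.min? row (fun y => y) with
    | none =>
      have he : row = [] := (PySem.List.min?_eq_none_iff _ _).mp hmin
      simp [he] at hj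
    | some v => exact ⟨v, rfl⟩
  have hmem : row.getD j 0 ∈ row := by
    rw [List.getD_eq_getElem row 0 hj]
    exact List.getElem_mem hj
  have hle := PySem.List.min?_isMin hmn _ hmem
  simpa [pvRowMin, hmn] using hle

theorem pv_MA_mem (h : List Int) (t : List (List Int)) :
    ∃ row ∈ h :: t, pvMA h t = pvRowMin row := by
  rcases PySem.List.foldl_max_mem (t.map pvRowMin) (pvRowMin h) with he | hm
  · exact ⟨h, by simp, he⟩
  · obtain ⟨row, hrow, hrw⟩ := List.mem_map.mp hm
    exact ⟨row, by simp [hrow], hrw.symm⟩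

theorem pv_rowMin_le_MA (h : List Int) (t : List (List Int)) (row : List Int)
    (hrow : row ∈ h :: t) : pvRowMin row ≤ pvMA h t := by
  rcases List.mem_cons.mp hrow with rfl | hmem
  · exact (PySem.List.le_foldl_max (t.map pvRowMin) (pvRowMin row)).1
  · exact (PySem.List.le_foldl_max (t.map pvRowMin) (pvRowMin h)).2 _
      (List.mem_map.mpr ⟨row, hmem, rfl⟩)

theorem pv_entry_le_CM (h : List Int) (t : List (List Int)) (j : Nat) (row : List Int)
    (hrow : row ∈ h :: t) : row.getD j 0 ≤ pvCM h t j := by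
  rcases List.mem_cons.mp hrow with rfl | hmem
  · exact (PySem.List.le_foldl_max (t.map (fun r => r.getD j 0)) (row.getD j 0)).1
  · exact (PySem.List.le_foldl_max (t.map (fun r => r.getD j 0)) (h.getD j 0)).2 _
      (List.mem_map.mpr ⟨row, hmem, rfl⟩)

theorem pv_MA_le_CM (h : List Int) (t : List (List Int)) (j : Nat)
    (hall : ∀ row ∈ h :: t, h.length ≤ row.length) (hj : j < h.length) :
    pvMA h t ≤ pvCM h t j := by
  obtain ⟨row, hrow, hMA⟩ := pv_MA_mem h t
  calc pvMA h t = pvRowMin row := hMA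
    _ ≤ row.getD j 0 := pv_rowMin_le row j (lt_of_lt_of_le hj (hall row hrow))
    _ ≤ pvCM h t j := pv_entry_le_CM h t j row hrow

-- a filter that can only keep one element of a Nodup list keeps exactly that element
theorem pv_filter_unique {a : Type} [DecidableEq a] (p : a → Bool) (v : a) :
    ∀ l : List a, l.Nodup → v ∈ l → (∀ x ∈ l, p x = true ↔ x = v) → l.filter p = [v] := by
  intro l
  induction l with
  | nil => intro _ hv; simp at hv
  | cons x xs ih =>
    intro hnd hv hp
    by_cases hxv : x = v
    · subst hxv
      have hpx : p x = true := (hp x (by simp)).mpr rfl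
      have hnotin : x ∉ xs := (List.nodup_cons.mp hnd).1
      have hnil : xs.filter p = [] := by
        rw [List.filter_eq_nil_iff]
        intro y hy hpy
        exact hnotin (((hp y (by simp [hy])).mp hpy) ▸ hy)
      simp [List.filter_cons, hpx, hnil]
    · have hmem : v ∈ xs := by
        rcases List.mem_cons.mp hv with h1 | h1
        · exact absurd h1.symm hxv
        · exact h1
      have hpx : p x = false := by
        cases hpe : p x with
        | false => rfl
        | true => exact absurd ((hp x (by simp)).mp hpe) hxv
      rw [List.filter_cons, if_neg (by simp [hpx])]
      exact ih (List.nodup_cons.mp hnd).2 hmem (fun y hy => hp y (by simp [hy]))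

-- ===== VERDICT (by name: the statement is the Claim_ definition above) =====
theorem luckyNumbers1_spec : Claim_equal_luckyNumbers1 := by
  intro matrix _ hpre
  obtain ⟨hne, hpos, hall⟩ := hpre
  match matrix, hne with
  | h :: t, _ =>
    simp only [List.headD_cons] at hpos hall
    unfold Spec_luckyNumbers1 luckyNumbers1_alt
    -- B's two lists
    have hRM : (h :: t).map (fun row => (PySem.List.min? row (fun y => y)).getD 0)
        = (h :: t).map pvRowMin := rfl
    have hzip := pvZipStar_eq h.length (h :: t) (by simp) (by simp) hall
    have hCMlist : (pvZipStar (h :: t)).map (fun col => (PySem.List.max? col (fun y => y)).getD 0)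
        = (List.range h.length).map (pvCM h t) := by
      rw [hzip, List.map_map]
      refine List.map_congr_left (fun j _ => ?_)
      simp only [Function.comp_apply, List.map_cons, PySem.List.max?_id_cons, Option.getD_some]
      rw [pvCM, List.foldl_map]
    rw [hRM, hCMlist, pvA_char h t]
    set RMset := PySem.Set.ofList ((h :: t).map pvRowMin) with hRMset
    -- membership facts
    have hmemCM : ∀ x : Int,
        (PySem.Set.contains (PySem.Set.ofList ((List.range h.length).map (pvCM h t))) x = true)
          ↔ ∃ j, j < h.length ∧ pvCM h t j = x := by
      intro x
      rw [PySem.Set.contains_iff, PySem.Set.mem_ofList]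
      constructor
      · intro hx
        obtain ⟨j, hj, hjx⟩ := List.mem_map.mp hx
        exact ⟨j, List.mem_range.mp hj, hjx⟩
      · rintro ⟨j, hj, hjx⟩
        exact List.mem_map.mpr ⟨j, List.mem_range.mpr hj, hjx⟩
    by_cases hP : ∃ j, j < h.length ∧ pvCM h t j = pvMA h t
    · -- a lucky number exists: both sides are [pvMA h t]
      have hany : ((PySem.List.pyRange 0 (h.length : Int) 1).any
          (fun c => pvCM h t c.toNat == pvMA h t)) = true := by
        obtain ⟨j, hj, hjx⟩ := hP
        refine List.any_eq_true.mpr ⟨(j : Int), ?_, ?_⟩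
        · exact PySem.List.mem_pyRange_one.mpr ⟨by positivity, by exact_mod_cast hj⟩
        · simp [hjx]
      rw [if_pos hany]
      refine (pv_filter_unique _ (pvMA h t) RMset (PySem.Set.nodup_ofList _) ?_ ?_).symm
      · rw [hRMset, PySem.Set.mem_ofList]
        obtain ⟨row, hrow, hMA⟩ := pv_MA_mem h t
        exact List.mem_map.mpr ⟨row, hrow, hMA.symm⟩
      · intro x hx
        rw [hRMset, PySem.Set.mem_ofList] at hx
        obtain ⟨row, hrow, hrx⟩ := List.mem_map.mp hx
        constructor
        · intro hpx
          obtain ⟨j, hj, hjx⟩ := (hmemCM x).mp hpx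
          have h1 : x ≤ pvMA h t := hrx ▸ pv_rowMin_le_MA h t row hrow
          have h2 : pvMA h t ≤ x := hjx ▸ pv_MA_le_CM h t j hall hj
          exact le_antisymm h1 h2
        · rintro rfl
          obtain ⟨j, hj, hjx⟩ := hP
          exact (hmemCM _).mpr ⟨j, hj, hjx⟩
    · -- no lucky number: both sides are []
      have hany : ((PySem.List.pyRange 0 (h.length : Int) 1).any
          (fun c => pvCM h t c.toNat == pvMA h t)) = false := by
        rw [List.any_eq_false]
        intro c hc
        obtain ⟨hc0, hcn⟩ := PySem.List.mem_pyRange_one.mp hc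
        intro hbeq
        refine hP ⟨c.toNat, ?_, by simpa using hbeq⟩
        omega
      rw [if_neg (by simp [hany])]
      refine (List.filter_eq_nil_iff.mpr ?_).symm
      intro x hx hpx
      rw [hRMset, PySem.Set.mem_ofList] at hx
      obtain ⟨row, hrow, hrx⟩ := List.mem_map.mp hx
      obtain ⟨j, hj, hjx⟩ := (hmemCM x).mp hpx
      have h1 : x ≤ pvMA h t := hrx ▸ pv_rowMin_le_MA h t row hrow
      have h2 : pvMA h t ≤ x := hjx ▸ pv_MA_le_CM h t j hall hj
      exact hP ⟨j, hj, hjx.trans (le_antisymm h1 h2)⟩
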